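-- pv_equiv track=rewrite | github.com/OllieBroadhurst/cce | ollie/tree_chart.py | highlight_route
-- ===== SOURCE A (Python) =====
-- def highlight_route(paths, node):
--     route_x = []
--     route_y = []
--
--     def get_route_coords(node):
--         for n in node:
--             n = tuple(n)
--             if paths.get(n) is not None:
--                 for v in paths[n]['joins']:
--
--                     route_x.append([n[0], v[0], None])
--                     route_y.append([n[1], v[1], None])
--
--                     get_route_coords([v])
--
--     get_route_coords(node)
--
--     route_x = sum(route_x, [])
--     route_y = sum(route_y, [])
--
--     return route_x, route_y
-- ===== SOURCE B (Python) =====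
-- def highlight_route(paths, node):
--     # Iterative DFS with an explicit LIFO stack of edges; emits flat coordinate
--     # lists directly (no per-edge sublists, no sum() flatten at the end).
--     route_x = []
--     route_y = []
--
--     stack = []
--     for n in reversed(node):
--         t = tuple(n)
--         d = paths.get(t)
--         if d is not None:
--             stack.extend((t, v) for v in reversed(d['joins']))
--
--     while stack:
--         n, v = stack.pop()
--         route_x += [n[0], v[0], None]
--         route_y += [n[1], v[1], None]
--         t = tuple(v)
--         d = paths.get(t)
--         if d is not None:
--             stack.extend((t, w) for w in reversed(d['joins']))
--
--     return route_x, route_y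
-- ===== Notes on version B (the rewrite author's own statement) =====
-- stated objective: alternative
-- what changed: The nested recursive closure that appends per-edge triple sublists and flattens them with sum() at the end is replaced by an iterative DFS over an explicit LIFO stack of edges (children pushed in reversed order) that emits the flat coordinate lists directly, with no recursion and no final flatten pass.
import Mathlib
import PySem

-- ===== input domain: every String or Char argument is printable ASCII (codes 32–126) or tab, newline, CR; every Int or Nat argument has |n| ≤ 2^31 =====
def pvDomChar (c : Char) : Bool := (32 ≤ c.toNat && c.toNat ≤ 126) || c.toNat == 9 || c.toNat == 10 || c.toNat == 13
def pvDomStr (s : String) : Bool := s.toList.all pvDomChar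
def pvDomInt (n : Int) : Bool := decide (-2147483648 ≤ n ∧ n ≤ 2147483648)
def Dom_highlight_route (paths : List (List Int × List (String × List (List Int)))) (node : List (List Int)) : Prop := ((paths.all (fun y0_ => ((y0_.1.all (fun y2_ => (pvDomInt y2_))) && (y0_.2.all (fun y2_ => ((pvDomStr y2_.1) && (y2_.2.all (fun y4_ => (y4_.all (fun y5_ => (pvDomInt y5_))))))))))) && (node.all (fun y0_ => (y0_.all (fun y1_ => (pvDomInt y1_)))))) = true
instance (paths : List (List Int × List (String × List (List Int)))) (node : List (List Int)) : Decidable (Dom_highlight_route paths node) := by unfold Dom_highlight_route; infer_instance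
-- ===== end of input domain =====

-- B replaces A's recursive closure (per-edge triple sublists + sum() flatten) by an iterative
-- DFS over an explicit LIFO stack of edges that builds the flat coordinate lists directly.

-- ===== PORT A =====
-- get_route_coords: hrGoA is the outer 'for n in node' loop, hrJoinsA the inner
-- 'for v in paths[n]["joins"]' loop (appends the two triples, then recurses on [v]).
-- The Nat fuel is a totality guard bounding the recursion depth (Python hits
-- RecursionError on a cyclic join graph; Pre_ excludes those inputs, and on the
-- remaining inputs depth paths.length + 2 is never exhausted).
-- n[0]/n[1] are ported as PySem.List.pyGet? (none = IndexError, excluded by Pre_).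
mutual
def hrJoinsA (paths : List (List Int × List (String × List (List Int)))) (f : Nat) (n : List Int) :
    List (List Int) → List (List (Option Int)) × List (List (Option Int)) →
    List (List (Option Int)) × List (List (Option Int))
  | [], acc => acc
  | v :: rest, acc =>
    hrJoinsA paths f n rest (hrGoA paths f [v]
      (acc.1 ++ [[PySem.List.pyGet? n 0, PySem.List.pyGet? v 0, none]],
       acc.2 ++ [[PySem.List.pyGet? n 1, PySem.List.pyGet? v 1, none]]))
  termination_by j _ => (f, 1, j.length)

def hrGoA (paths : List (List Int × List (String × List (List Int)))) (f : Nat)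
    (node : List (List Int)) (acc : List (List (Option Int)) × List (List (Option Int))) :
    List (List (Option Int)) × List (List (Option Int)) :=
  match f, node with
  | 0, _ => acc            -- fuel exhausted (Python: RecursionError; outside Pre_)
  | _+1, [] => acc
  | f'+1, n :: rest =>
    hrGoA paths (f'+1) rest
      (match List.lookup n paths with     -- paths.get(n)
       | none => acc
       | some d =>
         match List.lookup "joins" d with -- paths[n]['joins']
         | none => acc                    -- Python: KeyError (outside Pre_)
         | some j => hrJoinsA paths f' n j acc)
  termination_by (f, 0, node.length)
end

def highlight_route (paths : List (List Int × List (String × List (List Int)))) (node : List (List Int)) : List (Option Int) × List (Option Int) :=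
  let acc := hrGoA paths (paths.length + 2) node ([], [])
  (acc.1.foldl (· ++ ·) [], acc.2.foldl (· ++ ·) [])   -- sum(route_x, []), sum(route_y, [])

-- ===== PORT B =====
-- helpers of port B's totality guard: the maximum 'joins' length in paths, and a
-- weight for a stack; they only bound the number of loop iterations.
def hrMaxJ (paths : List (List Int × List (String × List (List Int)))) : Nat :=
  paths.foldl (fun m p => p.2.foldl (fun m q => max m q.2.length) m) 0

def hrCost (J : Nat) (S : List (Nat × List Int × List Int)) : Nat :=
  (S.map (fun e => (J + 1) ^ e.1)).sum

-- the 'while stack' loop: pop an edge (n, v), emit the six flat entries, push v's joins.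
-- Python pushes reversed(joins) and pops from the end; with head-as-top this is the
-- prepend 'j.map … ++ stack'.  The Nat fuel and the depth tag carried in each entry
-- are totality guards only (Python B loops forever on a cyclic graph; outside Pre_).
def hrAltLoop (paths : List (List Int × List (String × List (List Int)))) :
    Nat → List (Nat × List Int × List Int) → List (Option Int) → List (Option Int) →
    List (Option Int) × List (Option Int)
  | _, [], rx, ry => (rx, ry)
  | 0, _ :: _, rx, ry => (rx, ry)      -- fuel guard, never reached from the seed fuel
  | f+1, (d, n, v) :: stack, rx, ry =>
    match d, List.lookup v paths with  -- paths.get(tuple(v))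
    | d'+1, some dd =>
      (match List.lookup "joins" dd with
       | some j =>
         hrAltLoop paths f (j.map (fun w => (d', v, w)) ++ stack)
           (rx ++ [PySem.List.pyGet? n 0, PySem.List.pyGet? v 0, none])
           (ry ++ [PySem.List.pyGet? n 1, PySem.List.pyGet? v 1, none])
       | none =>                       -- Python: KeyError (outside Pre_)
         hrAltLoop paths f stack
           (rx ++ [PySem.List.pyGet? n 0, PySem.List.pyGet? v 0, none])
           (ry ++ [PySem.List.pyGet? n 1, PySem.List.pyGet? v 1, none]))
    | _, _ =>
      hrAltLoop paths f stack
        (rx ++ [PySem.List.pyGet? n 0, PySem.List.pyGet? v 0, none])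
        (ry ++ [PySem.List.pyGet? n 1, PySem.List.pyGet? v 1, none])

def highlight_route_alt (paths : List (List Int × List (String × List (List Int)))) (node : List (List Int)) : List (Option Int) × List (Option Int) :=
  -- seed loop: for n in reversed(node): push n's joins as edges (reversed) = flatMap in order
  let stack := node.flatMap (fun n =>
    match List.lookup n paths with
    | none => []
    | some d =>
      match List.lookup "joins" d with
      | none => []                     -- Python: KeyError (outside Pre_)
      | some j => j.map (fun v => (paths.length + 1, n, v)))
  hrAltLoop paths (hrCost (hrMaxJ paths) stack + 1) stack [] []

-- ===== PRECONDITION & SPEC =====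
-- graph helpers for Pre_: successors of a coordinate list, and a bounded reachability
-- closure.  hrClos is a shape condition on the INPUT's join graph (the standard decidable
-- phrasing of reachability/acyclicity), not a re-run of either port: neither port computes
-- a closure or a dedup, and no proof below uses Pre_.
def hrSuccs (paths : List (List Int × List (String × List (List Int)))) (k : List Int) : List (List Int) :=
  match List.lookup k paths with
  | none => []
  | some d =>
    match List.lookup "joins" d with
    | none => []
    | some j => j

def hrClos (paths : List (List Int × List (String × List (List Int)))) :
    Nat → List (List Int) → List (List Int)
  | 0, cur => cur
  | s+1, cur => hrClos paths s ((cur ++ cur.flatMap (hrSuccs paths)).dedup)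

def hrTotJ (paths : List (List Int × List (String × List (List Int)))) : Nat :=
  paths.foldl (fun a p => p.2.foldl (fun a q => a + q.2.length) a) 0

def hrReach (paths : List (List Int × List (String × List (List Int)))) (node : List (List Int)) : List (List Int) :=
  hrClos paths (node.length + hrTotJ paths + 1) node

-- Pre_ excludes exactly the inputs on which Python A raises: a 'joins'-less dict at a
-- visited key (KeyError), a visited coordinate list shorter than 2 at an emitted edge
-- (IndexError), and a cycle in the join graph reachable from node (RecursionError).
def Pre_highlight_route (paths : List (List Int × List (String × List (List Int)))) (node : List (List Int)) : Prop :=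
  ∀ k ∈ hrReach paths node, (List.lookup k paths).isSome = true →
    ((List.lookup k paths).bind (List.lookup "joins")).isSome = true ∧
    (hrSuccs paths k ≠ [] → 2 ≤ k.length ∧ ∀ v ∈ hrSuccs paths k, 2 ≤ v.length) ∧
    k ∉ hrClos paths (node.length + hrTotJ paths + 1) (hrSuccs paths k)

instance (paths : List (List Int × List (String × List (List Int)))) (node : List (List Int)) : Decidable (Pre_highlight_route paths node) := by
  unfold Pre_highlight_route; infer_instance

def pvWitness_highlight_route : (List (List Int × List (String × List (List Int)))) × List (List Int) :=
  ([([1, 2], [("joins", [[3, 4]])])], [[1, 2]])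

def Spec_highlight_route (paths : List (List Int × List (String × List (List Int)))) (node : List (List Int)) (out : List (Option Int) × List (Option Int)) : Prop := out = highlight_route_alt paths node
instance (paths : List (List Int × List (String × List (List Int)))) (node : List (List Int)) (out : List (Option Int) × List (Option Int)) : Decidable (Spec_highlight_route paths node out) := by unfold Spec_highlight_route; infer_instance

-- ===== CLAIM (what is proved, stated in full; the proofs are below) =====
def Claim_equal_highlight_route : Prop := ∀ (paths : List (List Int × List (String × List (List Int)))) (node : List (List Int)), Dom_highlight_route paths node → Pre_highlight_route paths node → Spec_highlight_route paths node (highlight_route paths node)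

-- ===== LEMMAS AND PROOFS =====

-- the common denotation: flat output of the subtree below one coordinate list (hrSub)
-- and below one joins list (hrSubJ), fuel-indexed exactly as the two ports are.
mutual
def hrSubJ (paths : List (List Int × List (String × List (List Int)))) (f : Nat) (n : List Int) :
    List (List Int) → List (Option Int) × List (Option Int)
  | [] => ([], [])
  | v :: rest =>
    ([PySem.List.pyGet? n 0, PySem.List.pyGet? v 0, none] ++ (hrSub paths f v).1 ++ (hrSubJ paths f n rest).1,
     [PySem.List.pyGet? n 1, PySem.List.pyGet? v 1, none] ++ (hrSub paths f v).2 ++ (hrSubJ paths f n rest).2)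
  termination_by j => (f, 1, j.length)

def hrSub (paths : List (List Int × List (String × List (List Int)))) (f : Nat) (v : List Int) :
    List (Option Int) × List (Option Int) :=
  match f with
  | 0 => ([], [])
  | f'+1 =>
    match List.lookup v paths with
    | none => ([], [])
    | some d =>
      match List.lookup "joins" d with
      | none => ([], [])
      | some j => hrSubJ paths f' v j
  termination_by (f, 0, 0)
end

def hrNodes (paths : List (List Int × List (String × List (List Int)))) (f : Nat) (node : List (List Int)) :
    List (Option Int) × List (Option Int) :=
  ((node.map (fun n => (hrSub paths f n).1)).flatten, (node.map (fun n => (hrSub paths f n).2)).flatten)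

def hrContrib (paths : List (List Int × List (String × List (List Int)))) :
    List (Nat × List Int × List Int) → List (Option Int) × List (Option Int)
  | [] => ([], [])
  | (d, n, v) :: S =>
    ([PySem.List.pyGet? n 0, PySem.List.pyGet? v 0, none] ++ (hrSub paths d v).1 ++ (hrContrib paths S).1,
     [PySem.List.pyGet? n 1, PySem.List.pyGet? v 1, none] ++ (hrSub paths d v).2 ++ (hrContrib paths S).2)

-- step lemmas for the WF-recursive definitions
theorem hrJoinsA_nil (paths : List (List Int × List (String × List (List Int)))) (f : Nat) (n : List Int)
    (acc : List (List (Option Int)) × List (List (Option Int))) :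
    hrJoinsA paths f n [] acc = acc := by simp [hrJoinsA]

theorem hrJoinsA_cons (paths : List (List Int × List (String × List (List Int)))) (f : Nat) (n v : List Int)
    (rest : List (List Int)) (acc : List (List (Option Int)) × List (List (Option Int))) :
    hrJoinsA paths f n (v :: rest) acc
      = hrJoinsA paths f n rest (hrGoA paths f [v]
          (acc.1 ++ [[PySem.List.pyGet? n 0, PySem.List.pyGet? v 0, none]],
           acc.2 ++ [[PySem.List.pyGet? n 1, PySem.List.pyGet? v 1, none]])) := by
  simp [hrJoinsA]

theorem hrGoA_zero (paths : List (List Int × List (String × List (List Int)))) (node : List (List Int))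
    (acc : List (List (Option Int)) × List (List (Option Int))) :
    hrGoA paths 0 node acc = acc := by simp [hrGoA]

theorem hrGoA_nil (paths : List (List Int × List (String × List (List Int)))) (f : Nat)
    (acc : List (List (Option Int)) × List (List (Option Int))) :
    hrGoA paths (f+1) [] acc = acc := by simp [hrGoA]

theorem hrGoA_cons_none (paths : List (List Int × List (String × List (List Int)))) (f : Nat)
    (n : List Int) (rest : List (List Int)) (acc : List (List (Option Int)) × List (List (Option Int)))
    (h : List.lookup n paths = none) :
    hrGoA paths (f+1) (n :: rest) acc = hrGoA paths (f+1) rest acc := by simp [hrGoA, h]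

theorem hrGoA_cons_nojoins (paths : List (List Int × List (String × List (List Int)))) (f : Nat)
    (n : List Int) (rest : List (List Int)) (acc : List (List (Option Int)) × List (List (Option Int)))
    (d : List (String × List (List Int))) (h : List.lookup n paths = some d)
    (h2 : List.lookup "joins" d = none) :
    hrGoA paths (f+1) (n :: rest) acc = hrGoA paths (f+1) rest acc := by simp [hrGoA, h, h2]

theorem hrGoA_cons_joins (paths : List (List Int × List (String × List (List Int)))) (f : Nat)
    (n : List Int) (rest : List (List Int)) (acc : List (List (Option Int)) × List (List (Option Int)))
    (d : List (String × List (List Int))) (j : List (List Int)) (h : List.lookup n paths = some d)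
    (h2 : List.lookup "joins" d = some j) :
    hrGoA paths (f+1) (n :: rest) acc = hrGoA paths (f+1) rest (hrJoinsA paths f n j acc) := by
  simp [hrGoA, h, h2]

theorem hrSub_zero (paths : List (List Int × List (String × List (List Int)))) (v : List Int) :
    hrSub paths 0 v = ([], []) := by simp [hrSub]

theorem hrSub_none (paths : List (List Int × List (String × List (List Int)))) (f : Nat) (v : List Int)
    (h : List.lookup v paths = none) : hrSub paths (f+1) v = ([], []) := by simp [hrSub, h]

theorem hrSub_nojoins (paths : List (List Int × List (String × List (List Int)))) (f : Nat) (v : List Int)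
    (d : List (String × List (List Int))) (h : List.lookup v paths = some d)
    (h2 : List.lookup "joins" d = none) : hrSub paths (f+1) v = ([], []) := by simp [hrSub, h, h2]

theorem hrSub_joins (paths : List (List Int × List (String × List (List Int)))) (f : Nat) (v : List Int)
    (d : List (String × List (List Int))) (j : List (List Int)) (h : List.lookup v paths = some d)
    (h2 : List.lookup "joins" d = some j) : hrSub paths (f+1) v = hrSubJ paths f v j := by
  simp [hrSub, h, h2]

theorem hrSubJ_nil (paths : List (List Int × List (String × List (List Int)))) (f : Nat) (n : List Int) :
    hrSubJ paths f n [] = ([], []) := by simp [hrSubJ]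

theorem hrSubJ_cons (paths : List (List Int × List (String × List (List Int)))) (f : Nat) (n v : List Int)
    (rest : List (List Int)) :
    hrSubJ paths f n (v :: rest)
      = ([PySem.List.pyGet? n 0, PySem.List.pyGet? v 0, none] ++ (hrSub paths f v).1 ++ (hrSubJ paths f n rest).1,
         [PySem.List.pyGet? n 1, PySem.List.pyGet? v 1, none] ++ (hrSub paths f v).2 ++ (hrSubJ paths f n rest).2) := by
  simp [hrSubJ]

theorem hrNodes_single (paths : List (List Int × List (String × List (List Int)))) (f : Nat) (v : List Int) :
    hrNodes paths f [v] = hrSub paths f v := by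
  simp [hrNodes]

theorem hrNodes_cons (paths : List (List Int × List (String × List (List Int)))) (f : Nat) (n : List Int)
    (rest : List (List Int)) :
    hrNodes paths f (n :: rest)
      = ((hrSub paths f n).1 ++ (hrNodes paths f rest).1,
         (hrSub paths f n).2 ++ (hrNodes paths f rest).2) := by
  simp [hrNodes]

-- A side: hrGoA flattens, accumulator out
theorem hrGoA_flatten (paths : List (List Int × List (String × List (List Int)))) :
    ∀ (f : Nat) (node : List (List Int)) (acc : List (List (Option Int)) × List (List (Option Int))),
      (hrGoA paths f node acc).1.flatten = acc.1.flatten ++ (hrNodes paths f node).1 ∧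
      (hrGoA paths f node acc).2.flatten = acc.2.flatten ++ (hrNodes paths f node).2 := by
  intro f
  induction f with
  | zero => intro node acc; simp [hrGoA_zero, hrNodes, hrSub_zero]
  | succ f ih =>
    have hJ : ∀ (j : List (List Int)) (n : List Int) (acc : List (List (Option Int)) × List (List (Option Int))),
        (hrJoinsA paths f n j acc).1.flatten = acc.1.flatten ++ (hrSubJ paths f n j).1 ∧
        (hrJoinsA paths f n j acc).2.flatten = acc.2.flatten ++ (hrSubJ paths f n j).2 := by
      intro j
      induction j with
      | nil => intro n acc; simp [hrJoinsA_nil, hrSubJ_nil]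
      | cons v rest ihj =>
        intro n acc
        rw [hrJoinsA_cons]
        obtain ⟨g1, g2⟩ := ih [v]
          (acc.1 ++ [[PySem.List.pyGet? n 0, PySem.List.pyGet? v 0, none]],
           acc.2 ++ [[PySem.List.pyGet? n 1, PySem.List.pyGet? v 1, none]])
        rw [hrNodes_single] at g1 g2
        obtain ⟨e1, e2⟩ := ihj n (hrGoA paths f [v]
          (acc.1 ++ [[PySem.List.pyGet? n 0, PySem.List.pyGet? v 0, none]],
           acc.2 ++ [[PySem.List.pyGet? n 1, PySem.List.pyGet? v 1, none]]))
        constructor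
        · rw [e1, g1, hrSubJ_cons]; simp
        · rw [e2, g2, hrSubJ_cons]; simp
    intro node
    induction node with
    | nil => intro acc; simp [hrGoA_nil, hrNodes]
    | cons n rest ihn =>
      intro acc
      cases h : List.lookup n paths with
      | none =>
        rw [hrGoA_cons_none paths f n rest acc h]
        obtain ⟨e1, e2⟩ := ihn acc
        rw [hrNodes_cons]
        constructor
        · rw [e1, hrSub_none paths f n h]; simp
        · rw [e2, hrSub_none paths f n h]; simp
      | some d =>
        cases h2 : List.lookup "joins" d with
        | none =>
          rw [hrGoA_cons_nojoins paths f n rest acc d h h2]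
          obtain ⟨e1, e2⟩ := ihn acc
          rw [hrNodes_cons]
          constructor
          · rw [e1, hrSub_nojoins paths f n d h h2]; simp
          · rw [e2, hrSub_nojoins paths f n d h h2]; simp
        | some j =>
          rw [hrGoA_cons_joins paths f n rest acc d j h h2]
          obtain ⟨j1, j2⟩ := hJ j n acc
          obtain ⟨e1, e2⟩ := ihn (hrJoinsA paths f n j acc)
          rw [hrNodes_cons]
          constructor
          · rw [e1, j1, hrSub_joins paths f n d j h h2]; simp
          · rw [e2, j2, hrSub_joins paths f n d j h h2]; simp

-- bounding 'joins' lengths by hrMaxJ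
theorem lookup_mem {α β : Type} [BEq α] [LawfulBEq α] {a : α} {b : β} :
    ∀ {l : List (α × β)}, List.lookup a l = some b → (a, b) ∈ l := by
  intro l
  induction l with
  | nil => intro h; simp [List.lookup] at h
  | cons p l ihl =>
    obtain ⟨k, v⟩ := p
    intro h
    by_cases hk : a == k
    · simp [List.lookup, hk] at h
      subst h
      simp [(LawfulBEq.eq_of_beq hk : a = k)]
    · simp [List.lookup, hk] at h
      exact List.mem_cons_of_mem _ (ihl h)

theorem foldl_step_le {α : Type} (F : Nat → α → Nat) (h : ∀ m x, m ≤ F m x) :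
    ∀ (l : List α) (m : Nat), m ≤ l.foldl F m := by
  intro l
  induction l with
  | nil => intro m; simp
  | cons x l ihl => intro m; exact le_trans (h m x) (ihl (F m x))

theorem foldl_mem_le {α : Type} (F : Nat → α → Nat) (hstep : ∀ m x, m ≤ F m x)
    (x : α) (c : Nat) (hx : ∀ m, c ≤ F m x) :
    ∀ (l : List α) (m : Nat), x ∈ l → c ≤ l.foldl F m := by
  intro l
  induction l with
  | nil => intro m hm; simp at hm
  | cons y l ihl =>
    intro m hm
    rcases List.mem_cons.mp hm with h | h
    · subst h; exact le_trans (hx m) (foldl_step_le F hstep l (F m x))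
    · exact ihl (F m y) h

theorem joins_len_le_maxJ (paths : List (List Int × List (String × List (List Int))))
    (k : List Int) (d : List (String × List (List Int))) (j : List (List Int))
    (hk : List.lookup k paths = some d) (hj : List.lookup "joins" d = some j) :
    j.length ≤ hrMaxJ paths := by
  have hmemd : (k, d) ∈ paths := lookup_mem hk
  have hmemj : ("joins", j) ∈ d := lookup_mem hj
  have hinner : ∀ m, j.length ≤ d.foldl (fun m q => max m q.2.length) m := by
    intro m
    exact foldl_mem_le (fun m q => max m q.2.length) (fun m q => Nat.le_max_left _ _)
      ("joins", j) j.length (fun m => Nat.le_max_right _ _) d m hmemj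
  exact foldl_mem_le (fun m p => p.2.foldl (fun m q => max m q.2.length) m)
    (fun m p => foldl_step_le _ (fun m q => Nat.le_max_left _ _) p.2 m)
    (k, d) j.length hinner paths 0 hmemd

theorem hrCost_append (J : Nat) (S1 S2 : List (Nat × List Int × List Int)) :
    hrCost J (S1 ++ S2) = hrCost J S1 + hrCost J S2 := by
  simp [hrCost]

theorem hrCost_map (J : Nat) (d : Nat) (v : List Int) (j : List (List Int)) :
    hrCost J (j.map (fun w => (d, v, w))) = j.length * (J + 1) ^ d := by
  induction j with
  | nil => simp [hrCost]
  | cons w rest ihj =>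
    simp only [List.map_cons, hrCost, List.map_map, List.sum_cons, List.length_cons] at ihj ⊢
    rw [ihj]
    ring

theorem hrContrib_append (paths : List (List Int × List (String × List (List Int))))
    (S1 S2 : List (Nat × List Int × List Int)) :
    hrContrib paths (S1 ++ S2)
      = ((hrContrib paths S1).1 ++ (hrContrib paths S2).1,
         (hrContrib paths S1).2 ++ (hrContrib paths S2).2) := by
  induction S1 with
  | nil => simp [hrContrib]
  | cons e S1 ih =>
    obtain ⟨d, n, v⟩ := e
    simp [hrContrib, ih]

theorem hrContrib_map_joins (paths : List (List Int × List (String × List (List Int))))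
    (d : Nat) (v : List Int) (j : List (List Int)) :
    hrContrib paths (j.map (fun w => (d, v, w))) = hrSubJ paths d v j := by
  induction j with
  | nil => simp [hrContrib, hrSubJ_nil]
  | cons w rest ihj => simp [hrContrib, hrSubJ_cons, ihj]

-- B side: the stack loop computes the stack's contribution, given enough fuel
theorem hrAltLoop_eq (paths : List (List Int × List (String × List (List Int)))) :
    ∀ (f : Nat) (S : List (Nat × List Int × List Int)) (rx ry : List (Option Int)),
      hrCost (hrMaxJ paths) S < f →
      hrAltLoop paths f S rx ry = (rx ++ (hrContrib paths S).1, ry ++ (hrContrib paths S).2) := by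
  intro f
  induction f with
  | zero => intro S rx ry h; omega
  | succ f ih =>
    intro S rx ry h
    cases S with
    | nil => simp [hrAltLoop, hrContrib]
    | cons e S =>
      obtain ⟨d, n, v⟩ := e
      have hcost : hrCost (hrMaxJ paths) ((d, n, v) :: S)
          = (hrMaxJ paths + 1) ^ d + hrCost (hrMaxJ paths) S := by simp [hrCost]
      have hpow : 1 ≤ (hrMaxJ paths + 1) ^ d := Nat.one_le_pow _ _ (by omega)
      cases d with
      | zero =>
        show hrAltLoop paths f S
              (rx ++ [PySem.List.pyGet? n 0, PySem.List.pyGet? v 0, none])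
              (ry ++ [PySem.List.pyGet? n 1, PySem.List.pyGet? v 1, none]) = _
        rw [ih S _ _ (by rw [hcost] at h; omega)]
        rw [show hrContrib paths ((0, n, v) :: S)
            = ([PySem.List.pyGet? n 0, PySem.List.pyGet? v 0, none] ++ (hrSub paths 0 v).1 ++ (hrContrib paths S).1,
               [PySem.List.pyGet? n 1, PySem.List.pyGet? v 1, none] ++ (hrSub paths 0 v).2 ++ (hrContrib paths S).2) from rfl]
        rw [hrSub_zero]
        simp
      | succ d' =>
        cases hv : List.lookup v paths with
        | none =>
          rw [show hrAltLoop paths (f+1) ((d'+1, n, v) :: S) rx ry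
              = hrAltLoop paths f S
                  (rx ++ [PySem.List.pyGet? n 0, PySem.List.pyGet? v 0, none])
                  (ry ++ [PySem.List.pyGet? n 1, PySem.List.pyGet? v 1, none]) from by
                simp [hrAltLoop, hv]]
          rw [ih S _ _ (by rw [hcost] at h; omega)]
          rw [show hrContrib paths ((d'+1, n, v) :: S)
              = ([PySem.List.pyGet? n 0, PySem.List.pyGet? v 0, none] ++ (hrSub paths (d'+1) v).1 ++ (hrContrib paths S).1,
                 [PySem.List.pyGet? n 1, PySem.List.pyGet? v 1, none] ++ (hrSub paths (d'+1) v).2 ++ (hrContrib paths S).2) from rfl]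
          rw [hrSub_none paths d' v hv]
          simp
        | some dd =>
          cases hj : List.lookup "joins" dd with
          | none =>
            rw [show hrAltLoop paths (f+1) ((d'+1, n, v) :: S) rx ry
                = hrAltLoop paths f S
                    (rx ++ [PySem.List.pyGet? n 0, PySem.List.pyGet? v 0, none])
                    (ry ++ [PySem.List.pyGet? n 1, PySem.List.pyGet? v 1, none]) from by
                  simp [hrAltLoop, hv, hj]]
            rw [ih S _ _ (by rw [hcost] at h; omega)]
            rw [show hrContrib paths ((d'+1, n, v) :: S)
                = ([PySem.List.pyGet? n 0, PySem.List.pyGet? v 0, none] ++ (hrSub paths (d'+1) v).1 ++ (hrContrib paths S).1,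
                   [PySem.List.pyGet? n 1, PySem.List.pyGet? v 1, none] ++ (hrSub paths (d'+1) v).2 ++ (hrContrib paths S).2) from rfl]
            rw [hrSub_nojoins paths d' v dd hv hj]
            simp
          | some j =>
            have hJlen : j.length ≤ hrMaxJ paths := joins_len_le_maxJ paths v dd j hv hj
            have hcost' : hrCost (hrMaxJ paths) (j.map (fun w => (d', v, w)) ++ S) < f := by
              rw [hrCost_append, hrCost_map]
              rw [hcost, pow_succ] at h
              have h1 : j.length * (hrMaxJ paths + 1) ^ d'
                  ≤ hrMaxJ paths * (hrMaxJ paths + 1) ^ d' :=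
                Nat.mul_le_mul_right _ hJlen
              have hpow' : 1 ≤ (hrMaxJ paths + 1) ^ d' := Nat.one_le_pow _ _ (by omega)
              nlinarith
            rw [show hrAltLoop paths (f+1) ((d'+1, n, v) :: S) rx ry
                = hrAltLoop paths f (j.map (fun w => (d', v, w)) ++ S)
                    (rx ++ [PySem.List.pyGet? n 0, PySem.List.pyGet? v 0, none])
                    (ry ++ [PySem.List.pyGet? n 1, PySem.List.pyGet? v 1, none]) from by
                  simp [hrAltLoop, hv, hj]]
            rw [ih _ _ _ hcost']
            rw [hrContrib_append, hrContrib_map_joins]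
            rw [show hrContrib paths ((d'+1, n, v) :: S)
                = ([PySem.List.pyGet? n 0, PySem.List.pyGet? v 0, none] ++ (hrSub paths (d'+1) v).1 ++ (hrContrib paths S).1,
                   [PySem.List.pyGet? n 1, PySem.List.pyGet? v 1, none] ++ (hrSub paths (d'+1) v).2 ++ (hrContrib paths S).2) from rfl]
            rw [hrSub_joins paths d' v dd j hv hj]
            simp

-- the seed stack's contribution is the top-level denotation
theorem hrContrib_seed (paths : List (List Int × List (String × List (List Int))))
    (node : List (List Int)) (dep : Nat) :
    hrContrib paths (node.flatMap (fun n =>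
      match List.lookup n paths with
      | none => []
      | some d =>
        match List.lookup "joins" d with
        | none => []
        | some j => j.map (fun v => (dep, n, v))))
    = hrNodes paths (dep + 1) node := by
  induction node with
  | nil => simp [hrContrib, hrNodes]
  | cons n rest ihn =>
    rw [List.flatMap_cons, hrContrib_append, ihn]
    cases h : List.lookup n paths with
    | none =>
      rw [hrNodes_cons, hrSub_none paths dep n h]
      simp [hrContrib]
    | some d =>
      cases h2 : List.lookup "joins" d with
      | none =>
        rw [hrNodes_cons, hrSub_nojoins paths dep n d h h2]
        simp [hrContrib, h2]
      | some j =>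
        rw [hrNodes_cons, hrSub_joins paths dep n d j h h2]
        simp [hrContrib_map_joins, h2]

-- ===== VERDICT (by name: the statement is the Claim_ definition above) =====
theorem highlight_route_spec : Claim_equal_highlight_route := by
  intro paths node _hdom _hpre
  unfold Spec_highlight_route highlight_route highlight_route_alt
  have hA := hrGoA_flatten paths (paths.length + 2) node ([], [])
  rw [hrAltLoop_eq paths _ _ [] [] (by omega), hrContrib_seed]
  simp only [PySem.List.foldl_append_eq_flatten, List.nil_append]
  rw [hA.1, hA.2]
  simp
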